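-- pv_equiv track=rewrite | github.com/grufghr/advent | advent2015/day05/puzzle.py | solve_part02
-- ===== SOURCE A (Python) =====
-- def solve_part02(input_data_list):
--     nice_count = 0
--
--     for text in input_data_list:
--
--         # rule 1 - non-overlapping duplicate pairs (e.g. ...xy...xy...), but not 'aaa'
--         has_duplicate = False
--         for i in range(1, len(text)):
--             dup = text[(i - 1):(i + 1)]
--             if text.find(dup, (i + 1)) > 0:
--                 has_duplicate = True
--                 break
--
--         # rule 2 - has 'repeater' (xyx, efe, aaa, etc.)
--         has_repeater = False
--         for i in range(2, len(text)):
--             p = i - 2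
--             if text[p] == text[i]:
--                 has_repeater = True
--                 break
--
--         if has_duplicate and has_repeater:
--             nice_count += 1
--
--     return nice_count
-- ===== SOURCE B (Python) =====
-- def solve_part02(input_data_list):
--     nice_count = 0
--     for text in input_data_list:
--         n = len(text)
--         seen = set()
--         has_duplicate = False
--         has_repeater = False
--         for j in range(n - 1):
--             if j >= 2:
--                 seen.add(text[j - 2:j])
--             if text[j:j + 2] in seen:
--                 has_duplicate = True
--             if j + 2 < n and text[j] == text[j + 2]:
--                 has_repeater = True
--         if has_duplicate and has_repeater:
--             nice_count += 1
--     return nice_count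
-- ===== Notes on version B (the rewrite author's own statement) =====
-- stated objective: alternative
-- what changed: Per string, the per-index str.find rescan and the separate repeater loop are replaced by one single pass that keeps a rolling set of pairs seen at least two positions back (membership test replaces the inner scan) and checks the xyx repeater in the same pass.
import Mathlib
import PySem

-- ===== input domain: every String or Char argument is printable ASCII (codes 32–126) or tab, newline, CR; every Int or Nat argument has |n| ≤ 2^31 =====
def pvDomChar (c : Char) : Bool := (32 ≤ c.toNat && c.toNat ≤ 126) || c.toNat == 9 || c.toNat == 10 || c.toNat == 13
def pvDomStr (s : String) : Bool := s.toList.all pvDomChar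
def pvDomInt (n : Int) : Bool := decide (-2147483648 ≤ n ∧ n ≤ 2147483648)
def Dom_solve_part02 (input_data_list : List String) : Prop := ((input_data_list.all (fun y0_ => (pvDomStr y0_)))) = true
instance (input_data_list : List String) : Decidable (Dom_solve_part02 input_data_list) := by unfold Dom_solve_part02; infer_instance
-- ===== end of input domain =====

-- B replaces A's per-index str.find rescan (and A's second loop) by one single pass per string
-- keeping a rolling set of pairs starting at least two positions back; return value only, no mutation.

-- ===== PORT A =====
def solve_part02 (input_data_list : List String) : Int :=
  input_data_list.foldl (fun nice_count text =>
    -- rule 1 - non-overlapping duplicate pairs (for-loop with break = short-circuit any)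
    let has_duplicate :=
      (PySem.List.pyRange 1 (PySem.Str.len text) 1).any (fun i =>
        let dup := PySem.Str.slice text (some (i - 1)) (some (i + 1))
        decide (PySem.Str.findFrom text dup (i + 1) > 0))
    -- rule 2 - has 'repeater' (for-loop with break = short-circuit any)
    let has_repeater :=
      (PySem.List.pyRange 2 (PySem.Str.len text) 1).any (fun i =>
        let p := i - 2
        PySem.Str.pyGet? text p == PySem.Str.pyGet? text i)
    if has_duplicate && has_repeater then nice_count + 1 else nice_count) 0

-- ===== PORT B =====
def solve_part02_alt (input_data_list : List String) : Int :=
  input_data_list.foldl (fun nice_count text =>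
    let n := PySem.Str.len text
    -- one pass: rolling set of pairs starting at least two positions back, both flags kept together
    let st :=
      (PySem.List.pyRange 0 (n - 1) 1).foldl
        (fun (st : PySem.Set String × Bool × Bool) j =>
          let seen := if j ≥ 2 then PySem.Set.add st.1 (PySem.Str.slice text (some (j - 2)) (some j)) else st.1
          let dup := st.2.1 || PySem.Set.contains seen (PySem.Str.slice text (some j) (some (j + 2)))
          let rep := st.2.2 || (decide (j + 2 < n) && (PySem.Str.pyGet? text j == PySem.Str.pyGet? text (j + 2)))
          (seen, dup, rep))
        (PySem.Set.empty, false, false)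
    if st.2.1 && st.2.2 then nice_count + 1 else nice_count) 0

-- ===== PRECONDITION & SPEC =====
def Spec_solve_part02 (input_data_list : List String) (out : Int) : Prop := out = solve_part02_alt input_data_list
instance (input_data_list : List String) (out : Int) : Decidable (Spec_solve_part02 input_data_list out) := by unfold Spec_solve_part02; infer_instance

-- ===== CLAIM (what is proved, stated in full; the proofs are below) =====
def Claim_equal_solve_part02 : Prop := ∀ (input_data_list : List String), Dom_solve_part02 input_data_list → Spec_solve_part02 input_data_list (solve_part02 input_data_list)

-- ===== LEMMAS AND PROOFS =====

/-- the pair of characters starting at position `k` -/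
def pvPair (cs : List Char) (k : Nat) : List Char := (cs.drop k).take 2

/-- some pair occurs again at least two positions later (the "non-overlapping duplicate pair" rule) -/
def pvDupSpec (cs : List Char) : Prop :=
  ∃ a b : Nat, a + 2 ≤ b ∧ b + 2 ≤ cs.length ∧ pvPair cs a = pvPair cs b

/-- some character repeats at distance two (the "repeater" rule) -/
def pvRepSpec (cs : List Char) : Prop :=
  ∃ p : Nat, p + 2 < cs.length ∧ cs[p]? = cs[p + 2]?

/-- B's inner loop, over `List.range` (proof-side name for the fold in `solve_part02_alt`) -/
def pvBfold (text : String) (m : Nat) : PySem.Set String × Bool × Bool :=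
  (List.range m).foldl
    (fun (st : PySem.Set String × Bool × Bool) (k : Nat) =>
      let seen := if (k : Int) ≥ 2 then PySem.Set.add st.1 (PySem.Str.slice text (some ((k : Int) - 2)) (some (k : Int))) else st.1
      let dup := st.2.1 || PySem.Set.contains seen (PySem.Str.slice text (some (k : Int)) (some ((k : Int) + 2)))
      let rep := st.2.2 || (decide ((k : Int) + 2 < PySem.Str.len text) && (PySem.Str.pyGet? text (k : Int) == PySem.Str.pyGet? text ((k : Int) + 2)))
      (seen, dup, rep))
    (PySem.Set.empty, false, false)

lemma pvSlice_pair_toList (text : String) (i : Nat) :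
    (PySem.Str.slice text (some (i : Int)) (some ((i : Int) + 2))).toList = pvPair text.toList i := by
  have h := PySem.List.slice_natCast_add text.toList i 2
  norm_num at h
  simp [pvPair, h]

lemma pvSlice_pair_inj (text : String) (i j : Nat) :
    PySem.Str.slice text (some (i : Int)) (some ((i : Int) + 2)) = PySem.Str.slice text (some (j : Int)) (some ((j : Int) + 2))
      ↔ pvPair text.toList i = pvPair text.toList j := by
  rw [← String.toList_inj, pvSlice_pair_toList, pvSlice_pair_toList]

lemma pvPair_len (cs : List Char) (k : Nat) (hk : k + 2 ≤ cs.length) : (pvPair cs k).length = 2 := by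
  simp [pvPair]; omega

lemma pvA_dup_elem (cs : List Char) (k : Nat) (hk : k + 2 ≤ cs.length) :
    0 < PySem.Chars.findFrom cs (pvPair cs k) ((k : Int) + 2) ↔
      ∃ b : Nat, k + 2 ≤ b ∧ b + 2 ≤ cs.length ∧ pvPair cs k = pvPair cs b := by
  have e : ((k : Int) + 2) = (((k + 2 : Nat)) : Int) := by push_cast; ring
  rw [e, PySem.Chars.findFrom_natCast cs _ (k + 2) hk]
  have hlen := pvPair_len cs k hk
  constructor
  · intro h
    split_ifs at h with hf
    · omega
    · have hinf : pvPair cs k <:+: cs.drop (k + 2) := by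
        rwa [← PySem.Chars.find_ne_neg_one_iff]
      obtain ⟨j, hj⟩ := (PySem.Chars.exists_prefix_drop_iff_isIn (pvPair cs k) (cs.drop (k+2))).2
        ((PySem.Chars.isIn_iff_infix _ _).2 hinf)
      rw [List.drop_drop] at hj
      refine ⟨k + 2 + j, by omega, ?_, ?_⟩
      · have := hj.length_le
        simp [hlen] at this ⊢
        omega
      · have heq := List.prefix_iff_eq_take.1 hj
        rw [hlen] at heq
        rw [heq]
        simp [pvPair]
  · rintro ⟨b, hb1, hb2, he⟩
    have hpre : pvPair cs k <+: cs.drop b := by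
      rw [List.prefix_iff_eq_take, hlen, he]
      rfl
    have hsuf : cs.drop b <:+ cs.drop (k + 2) := by
      have hd : cs.drop b = (cs.drop (k + 2)).drop (b - (k + 2)) := by
        rw [List.drop_drop]; congr 1; omega
      rw [hd]; exact List.drop_suffix _ _
    have hinf : pvPair cs k <:+: cs.drop (k + 2) := hpre.isInfix.trans hsuf.isInfix
    rw [← PySem.Chars.find_ne_neg_one_iff] at hinf
    have hge := PySem.Chars.neg_one_le_find (cs.drop (k+2)) (pvPair cs k)
    split_ifs with hf
    · exact absurd hf hinf
    · omega

lemma pvA_dup_iff (text : String) :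
    ((PySem.List.pyRange 1 (PySem.Str.len text) 1).any (fun i =>
        let dup := PySem.Str.slice text (some (i - 1)) (some (i + 1))
        decide (PySem.Str.findFrom text dup (i + 1) > 0)) = true)
      ↔ pvDupSpec text.toList := by
  rw [List.any_eq_true]
  constructor
  · rintro ⟨i, hmem, hP⟩
    rw [PySem.List.mem_pyRange_one] at hmem
    obtain ⟨k, rfl⟩ : ∃ k : Nat, i = (k : Int) + 1 := ⟨(i - 1).toNat, by omega⟩
    simp only [PySem.Str.len_eq] at hmem
    have hk : k + 2 ≤ text.toList.length := by omega
    simp only [decide_eq_true_eq] at hP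
    have e1 : ((k : Int) + 1 - 1) = (k : Int) := by ring
    have e2 : ((k : Int) + 1 + 1) = (k : Int) + 2 := by ring
    rw [e1, e2] at hP
    rw [PySem.Str.findFrom_eq, pvSlice_pair_toList] at hP
    rw [gt_iff_lt, pvA_dup_elem text.toList k hk] at hP
    obtain ⟨b, h1, h2, h3⟩ := hP
    exact ⟨k, b, by omega, h2, h3⟩
  · rintro ⟨a, b, hab, hb, he⟩
    refine ⟨(a : Int) + 1, ?_, ?_⟩
    · rw [PySem.List.mem_pyRange_one]
      simp only [PySem.Str.len_eq]
      omega
    · simp only [decide_eq_true_eq]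
      have e1 : ((a : Int) + 1 - 1) = (a : Int) := by ring
      have e2 : ((a : Int) + 1 + 1) = (a : Int) + 2 := by ring
      rw [e1, e2, PySem.Str.findFrom_eq, pvSlice_pair_toList]
      rw [gt_iff_lt, pvA_dup_elem text.toList a (by omega)]
      exact ⟨b, hab, hb, he⟩

lemma pvA_rep_iff (text : String) :
    ((PySem.List.pyRange 2 (PySem.Str.len text) 1).any (fun i =>
        let p := i - 2
        PySem.Str.pyGet? text p == PySem.Str.pyGet? text i) = true)
      ↔ pvRepSpec text.toList := by
  rw [List.any_eq_true]
  constructor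
  · rintro ⟨i, hmem, hP⟩
    rw [PySem.List.mem_pyRange_one] at hmem
    obtain ⟨p, rfl⟩ : ∃ p : Nat, i = (p : Int) + 2 := ⟨(i - 2).toNat, by omega⟩
    simp only [PySem.Str.len_eq] at hmem
    simp only [beq_iff_eq] at hP
    have e1 : ((p : Int) + 2 - 2) = (p : Int) := by ring
    have e2 : ((p : Int) + 2) = (((p + 2 : Nat)) : Int) := by push_cast; ring
    rw [e1, e2, PySem.Str.pyGet?_natCast, PySem.Str.pyGet?_natCast] at hP
    exact ⟨p, by omega, hP⟩
  · rintro ⟨p, hlt, he⟩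
    refine ⟨(p : Int) + 2, ?_, ?_⟩
    · rw [PySem.List.mem_pyRange_one]; simp only [PySem.Str.len_eq]; omega
    · simp only [beq_iff_eq]
      have e1 : ((p : Int) + 2 - 2) = (p : Int) := by ring
      have e2 : ((p : Int) + 2) = (((p + 2 : Nat)) : Int) := by push_cast; ring
      rw [e1, e2, PySem.Str.pyGet?_natCast, PySem.Str.pyGet?_natCast]
      exact he

lemma pvB_loop (text : String) (m : Nat) :
    (∀ x : String, x ∈ (pvBfold text m).1 ↔
        ∃ i : Nat, i + 3 ≤ m ∧ x = PySem.Str.slice text (some (i : Int)) (some ((i : Int) + 2))) ∧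
    ((pvBfold text m).2.1 = true ↔
        ∃ j : Nat, j < m ∧ ∃ i : Nat, i + 2 ≤ j ∧ pvPair text.toList i = pvPair text.toList j) ∧
    ((pvBfold text m).2.2 = true ↔
        ∃ j : Nat, j < m ∧ j + 2 < text.toList.length ∧ text.toList[j]? = text.toList[j + 2]?) := by
  induction m with
  | zero =>
    refine ⟨?_, ?_, ?_⟩ <;> simp [pvBfold, PySem.Set.empty]
  | succ m ih =>
    obtain ⟨hS, hd, hr⟩ := ih
    have hstep : pvBfold text (m + 1) =
        (let st := pvBfold text m
         let seen := if (m : Int) ≥ 2 then PySem.Set.add st.1 (PySem.Str.slice text (some ((m : Int) - 2)) (some (m : Int))) else st.1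
         let dup := st.2.1 || PySem.Set.contains seen (PySem.Str.slice text (some (m : Int)) (some ((m : Int) + 2)))
         let rep := st.2.2 || (decide ((m : Int) + 2 < PySem.Str.len text) && (PySem.Str.pyGet? text (m : Int) == PySem.Str.pyGet? text ((m : Int) + 2)))
         (seen, dup, rep)) := by
      unfold pvBfold
      rw [List.range_succ, List.foldl_append, List.foldl_cons, List.foldl_nil]
    rw [hstep]
    have hseen : ∀ x : String,
        x ∈ (if (m : Int) ≥ 2 then PySem.Set.add (pvBfold text m).1 (PySem.Str.slice text (some ((m : Int) - 2)) (some (m : Int))) else (pvBfold text m).1) ↔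
        ∃ i : Nat, i + 3 ≤ m + 1 ∧ x = PySem.Str.slice text (some (i : Int)) (some ((i : Int) + 2)) := by
      intro x
      split_ifs with h2
      · have hm2 : 2 ≤ m := by exact_mod_cast h2
        have eq1 : ((m : Int) - 2) = (((m - 2 : Nat)) : Int) := by omega
        have eq2 : (m : Int) = (((m - 2 : Nat)) : Int) + 2 := by omega
        rw [eq1, eq2, PySem.Set.mem_add, hS x]
        constructor
        · rintro (⟨i, hi, rfl⟩ | rfl)
          · exact ⟨i, by omega, rfl⟩
          · exact ⟨m - 2, by omega, rfl⟩
        · rintro ⟨i, hi, rfl⟩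
          by_cases hcase : i + 3 ≤ m
          · exact Or.inl ⟨i, hcase, rfl⟩
          · have hi2 : i = m - 2 := by omega
            subst hi2
            exact Or.inr rfl
      · have hm2 : m < 2 := by omega
        rw [hS x]
        constructor
        · rintro ⟨i, hi, rfl⟩; exact ⟨i, by omega, rfl⟩
        · rintro ⟨i, hi, rfl⟩; omega
    refine ⟨hseen, ?_, ?_⟩
    · simp only [Bool.or_eq_true, hd, PySem.Set.contains_iff, hseen]
      constructor
      · rintro (⟨j, hj, hrest⟩ | ⟨i, hi, hEq⟩)
        · exact ⟨j, by omega, hrest⟩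
        · refine ⟨m, by omega, i, by omega, ?_⟩
          exact ((pvSlice_pair_inj text m i).1 hEq).symm
      · rintro ⟨j, hj, i, hi, hEq⟩
        by_cases hcase : j < m
        · exact Or.inl ⟨j, hcase, i, hi, hEq⟩
        · have hjm : j = m := by omega
          subst hjm
          exact Or.inr ⟨i, by omega, ((pvSlice_pair_inj text j i).2 hEq.symm)⟩
    · simp only [Bool.or_eq_true, hr, Bool.and_eq_true, decide_eq_true_eq, beq_iff_eq]
      have eme : ((m : Int) + 2) = (((m + 2 : Nat)) : Int) := by push_cast; ring
      rw [eme, PySem.Str.pyGet?_natCast, PySem.Str.pyGet?_natCast]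
      simp only [PySem.Str.len_eq]
      constructor
      · rintro (⟨j, hj, hrest⟩ | ⟨hlt, hEq⟩)
        · exact ⟨j, by omega, hrest⟩
        · exact ⟨m, by omega, by exact_mod_cast hlt, hEq⟩
      · rintro ⟨j, hj, hlt, hEq⟩
        by_cases hcase : j < m
        · exact Or.inl ⟨j, hcase, hlt, hEq⟩
        · have hjm : j = m := by omega
          subst hjm
          exact Or.inr ⟨by exact_mod_cast hlt, hEq⟩

lemma pvB_dup_iff (text : String) :
    ((pvBfold text (text.toList.length - 1)).2.1 = true) ↔ pvDupSpec text.toList := by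
  rw [(pvB_loop text (text.toList.length - 1)).2.1]
  constructor
  · rintro ⟨j, hj, i, hi, hEq⟩
    exact ⟨i, j, hi, by omega, hEq⟩
  · rintro ⟨a, b, hab, hb, hEq⟩
    exact ⟨b, by omega, a, hab, hEq⟩

lemma pvB_rep_iff (text : String) :
    ((pvBfold text (text.toList.length - 1)).2.2 = true) ↔ pvRepSpec text.toList := by
  rw [(pvB_loop text (text.toList.length - 1)).2.2]
  constructor
  · rintro ⟨j, hj, hlt, hEq⟩
    exact ⟨j, hlt, hEq⟩
  · rintro ⟨p, hlt, hEq⟩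
    exact ⟨p, by omega, hlt, hEq⟩

lemma pvFold_eq_bfold (text : String) :
    ((PySem.List.pyRange 0 (PySem.Str.len text - 1) 1).foldl
        (fun (st : PySem.Set String × Bool × Bool) j =>
          let seen := if j ≥ 2 then PySem.Set.add st.1 (PySem.Str.slice text (some (j - 2)) (some j)) else st.1
          let dup := st.2.1 || PySem.Set.contains seen (PySem.Str.slice text (some j) (some (j + 2)))
          let rep := st.2.2 || (decide (j + 2 < PySem.Str.len text) && (PySem.Str.pyGet? text j == PySem.Str.pyGet? text (j + 2)))
          (seen, dup, rep))
        (PySem.Set.empty, false, false))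
      = pvBfold text (text.toList.length - 1) := by
  rw [PySem.List.pyRange_one, List.foldl_map]
  unfold pvBfold
  have e2 : (PySem.Str.len text - 1 - 0).toNat = text.toList.length - 1 := by
    simp only [PySem.Str.len_eq]; omega
  rw [e2]
  simp only [zero_add]

lemma pvStep_eq (acc : Int) (text : String) :
    (let has_duplicate :=
      (PySem.List.pyRange 1 (PySem.Str.len text) 1).any (fun i =>
        let dup := PySem.Str.slice text (some (i - 1)) (some (i + 1))
        decide (PySem.Str.findFrom text dup (i + 1) > 0))
     let has_repeater :=
      (PySem.List.pyRange 2 (PySem.Str.len text) 1).any (fun i =>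
        let p := i - 2
        PySem.Str.pyGet? text p == PySem.Str.pyGet? text i)
     if has_duplicate && has_repeater then acc + 1 else acc)
    =
    (let n := PySem.Str.len text
     let st :=
      (PySem.List.pyRange 0 (n - 1) 1).foldl
        (fun (st : PySem.Set String × Bool × Bool) j =>
          let seen := if j ≥ 2 then PySem.Set.add st.1 (PySem.Str.slice text (some (j - 2)) (some j)) else st.1
          let dup := st.2.1 || PySem.Set.contains seen (PySem.Str.slice text (some j) (some (j + 2)))
          let rep := st.2.2 || (decide (j + 2 < n) && (PySem.Str.pyGet? text j == PySem.Str.pyGet? text (j + 2)))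
          (seen, dup, rep))
        (PySem.Set.empty, false, false)
     if st.2.1 && st.2.2 then acc + 1 else acc) := by
  simp only []
  rw [pvFold_eq_bfold]
  congr 1
  rw [Bool.eq_iff_iff, Bool.and_eq_true, Bool.and_eq_true]
  rw [pvA_dup_iff, pvA_rep_iff, pvB_dup_iff, pvB_rep_iff]
  simp

-- ===== VERDICT (by name: the statement is the Claim_ definition above) =====
theorem solve_part02_spec : Claim_equal_solve_part02 := by
  intro l _
  unfold Spec_solve_part02 solve_part02 solve_part02_alt
  apply List.foldl_ext
  intro a t _
  exact pvStep_eq a t
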